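-- pv_equiv track=rewrite | github.com/lunchboxfortwo/chode | strategy/preflop_chart.py | position_labels
-- ===== SOURCE A (Python) =====
-- def position_labels(n_players: int) -> list[str]:
--     """Return a position label for each player_idx in [0, n_players).
--
--     Matches preflop_fixed_train.py player ordering:
--     Player 0 = first to act preflop, last two = SB, BB.
--     """
--     if n_players == 2:
--         return ["SB", "BB"]       # SB=BTN acts first
--     if n_players == 3:
--         return ["BTN", "SB", "BB"]
--     if n_players == 4:
--         return ["CO", "BTN", "SB", "BB"]
--     if n_players == 5:
--         return ["HJ", "CO", "BTN", "SB", "BB"]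
--     if n_players == 6:
--         return ["LJ", "HJ", "CO", "BTN", "SB", "BB"]
--     if n_players == 7:
--         return ["UTG", "LJ", "HJ", "CO", "BTN", "SB", "BB"]
--     if n_players == 8:
--         return ["UTG1", "UTG", "LJ", "HJ", "CO", "BTN", "SB", "BB"]
--     # Fallback for larger tables
--     n_early = n_players - 4
--     early = [f"EP{i+1}" for i in range(n_early)]
--     return [*early, "LJ", "CO", "BTN", "SB", "BB"]
-- ===== SOURCE B (Python) =====
-- NEXT_SEAT = {3: "BTN", 4: "CO", 5: "HJ", 6: "LJ", 7: "UTG", 8: "UTG1"}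
--
--
-- def position_labels(n_players: int) -> list[str]:
--     if n_players < 2 or n_players > 8:
--         early = [f"EP{i+1}" for i in range(n_players - 4)]
--         return [*early, "LJ", "CO", "BTN", "SB", "BB"]
--     if n_players == 2:
--         return ["SB", "BB"]
--     return [NEXT_SEAT[n_players], *position_labels(n_players - 1)]
-- ===== Notes on version B (the rewrite author's own statement) =====
-- stated objective: alternative
-- what changed: Replaces A's seven hard-coded full lists with a recursion that prepends one new seat label per extra player (NEXT_SEAT lookup) down to the heads-up base case; the out-of-range fallback is unchanged.
import Mathlib
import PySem

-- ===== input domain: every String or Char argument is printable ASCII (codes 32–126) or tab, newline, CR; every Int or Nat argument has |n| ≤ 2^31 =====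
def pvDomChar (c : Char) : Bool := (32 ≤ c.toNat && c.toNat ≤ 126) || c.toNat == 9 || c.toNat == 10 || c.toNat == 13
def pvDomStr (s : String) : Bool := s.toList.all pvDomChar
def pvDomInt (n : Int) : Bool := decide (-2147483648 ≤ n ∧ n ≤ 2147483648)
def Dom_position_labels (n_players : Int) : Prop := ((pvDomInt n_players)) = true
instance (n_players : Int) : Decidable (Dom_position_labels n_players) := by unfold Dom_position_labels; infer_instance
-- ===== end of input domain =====

-- B builds the label list recursively, adding one new seat label per extra player; A returns seven hard-coded lists. Same values, different decomposition.

-- ===== PORT A =====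
def position_labels (n_players : Int) : List String :=
  if n_players = 2 then ["SB", "BB"]
  else if n_players = 3 then ["BTN", "SB", "BB"]
  else if n_players = 4 then ["CO", "BTN", "SB", "BB"]
  else if n_players = 5 then ["HJ", "CO", "BTN", "SB", "BB"]
  else if n_players = 6 then ["LJ", "HJ", "CO", "BTN", "SB", "BB"]
  else if n_players = 7 then ["UTG", "LJ", "HJ", "CO", "BTN", "SB", "BB"]
  else if n_players = 8 then ["UTG1", "UTG", "LJ", "HJ", "CO", "BTN", "SB", "BB"]
  else
    let n_early := n_players - 4
    let early := (PySem.List.pyRange 0 n_early 1).map (fun i => "EP" ++ PySem.Int.toStr (i + 1))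
    early ++ ["LJ", "CO", "BTN", "SB", "BB"]

-- ===== PORT B =====
-- NEXT_SEAT dict; lookup NEXT_SEAT[n] is only reached for n in 3..8, where it is total.
def pvNextSeat : PySem.Dict Int String :=
  PySem.Dict.ofList [(3, "BTN"), (4, "CO"), (5, "HJ"), (6, "LJ"), (7, "UTG"), (8, "UTG1")]

def position_labels_alt (n_players : Int) : List String :=
  if n_players < 2 ∨ n_players > 8 then
    let early := (PySem.List.pyRange 0 (n_players - 4) 1).map (fun i => "EP" ++ PySem.Int.toStr (i + 1))
    early ++ ["LJ", "CO", "BTN", "SB", "BB"]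
  else if n_players = 2 then ["SB", "BB"]
  else (PySem.Dict.getD pvNextSeat n_players "") :: position_labels_alt (n_players - 1)
termination_by n_players.toNat
decreasing_by
  rename_i h1 h2
  simp only [not_or, not_lt] at h1
  omega

-- ===== PRECONDITION & SPEC =====
def Spec_position_labels (n_players : Int) (out : List String) : Prop := out = position_labels_alt n_players
instance (n_players : Int) (out : List String) : Decidable (Spec_position_labels n_players out) := by unfold Spec_position_labels; infer_instance

-- ===== CLAIM =====
def Claim_equal_position_labels : Prop := ∀ (n_players : Int), Dom_position_labels n_players → Spec_position_labels n_players (position_labels n_players)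

-- ===== LEMMAS AND PROOFS =====
theorem pv_alt_small (n : Int) (h : ¬ (n < 2 ∨ n > 8)) (h2 : n ≠ 2) :
    position_labels_alt n = (PySem.Dict.getD pvNextSeat n "") :: position_labels_alt (n - 1) := by
  rw [position_labels_alt, if_neg h, if_neg h2]

theorem pv_alt_2 : position_labels_alt 2 = ["SB", "BB"] := by
  rw [position_labels_alt]; decide

theorem pv_alt_3 : position_labels_alt 3 = ["BTN", "SB", "BB"] := by
  rw [pv_alt_small 3 (by omega) (by omega)]
  norm_num [pv_alt_2, pvNextSeat, PySem.Dict.ofList]; rfl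

theorem pv_alt_4 : position_labels_alt 4 = ["CO", "BTN", "SB", "BB"] := by
  rw [pv_alt_small 4 (by omega) (by omega)]
  norm_num [pv_alt_3, pvNextSeat, PySem.Dict.ofList]; rfl

theorem pv_alt_5 : position_labels_alt 5 = ["HJ", "CO", "BTN", "SB", "BB"] := by
  rw [pv_alt_small 5 (by omega) (by omega)]
  norm_num [pv_alt_4, pvNextSeat, PySem.Dict.ofList]; rfl

theorem pv_alt_6 : position_labels_alt 6 = ["LJ", "HJ", "CO", "BTN", "SB", "BB"] := by
  rw [pv_alt_small 6 (by omega) (by omega)]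
  norm_num [pv_alt_5, pvNextSeat, PySem.Dict.ofList]; rfl

theorem pv_alt_7 : position_labels_alt 7 = ["UTG", "LJ", "HJ", "CO", "BTN", "SB", "BB"] := by
  rw [pv_alt_small 7 (by omega) (by omega)]
  norm_num [pv_alt_6, pvNextSeat, PySem.Dict.ofList]; rfl

theorem pv_alt_8 : position_labels_alt 8 = ["UTG1", "UTG", "LJ", "HJ", "CO", "BTN", "SB", "BB"] := by
  rw [pv_alt_small 8 (by omega) (by omega)]
  norm_num [pv_alt_7, pvNextSeat, PySem.Dict.ofList]; rfl

-- ===== VERDICT =====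
theorem position_labels_spec : Claim_equal_position_labels := by
  intro n _
  unfold Spec_position_labels
  by_cases h2 : n = 2; · subst h2; rw [pv_alt_2]; decide
  by_cases h3 : n = 3; · subst h3; rw [pv_alt_3]; decide
  by_cases h4 : n = 4; · subst h4; rw [pv_alt_4]; decide
  by_cases h5 : n = 5; · subst h5; rw [pv_alt_5]; decide
  by_cases h6 : n = 6; · subst h6; rw [pv_alt_6]; decide
  by_cases h7 : n = 7; · subst h7; rw [pv_alt_7]; decide
  by_cases h8 : n = 8; · subst h8; rw [pv_alt_8]; decide
  have hout : n < 2 ∨ n > 8 := by omega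
  rw [position_labels_alt]
  simp only [position_labels, h2, h3, h4, h5, h6, h7, h8, hout, if_false, if_true]
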